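-- pv_equiv track=rewrite | github.com/Purinat33/Subnet-Calculation | main.py | insertDot
-- ===== SOURCE A (Python) =====
-- def insertDot(bin_ip):
--     # Insert after every 8th
--     ip = ""
--     count = 0
--     for i in range(len(bin_ip)):
--         ip += bin_ip[i]
--         i += 1
--         if i % 8 == 0:
--             ip += '.'
--
--     ip = ip.removesuffix('.')
--     return ip
-- ===== SOURCE B (Python) =====
-- def insertDot(bin_ip):
--     parts = [bin_ip[i:i+8] for i in range(0, len(bin_ip), 8)]
--     return '.'.join(parts)
-- ===== Notes on version B (the rewrite author's own statement) =====
-- stated objective: simpler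
-- what changed: B slices the string into 8-character groups with a stride-8 range and lets join place separators only between groups, replacing A's per-character loop with a modulo counter and the removesuffix fixup.
-- intended difference: On nonempty inputs whose length is not a multiple of 8 and whose last character is a dot, A's removesuffix strips that genuine final input character, while B keeps every input character, which is the intended behaviour of a function that only inserts separators. — e.g. on insertDot("."): A returns "", B returns "."
import Mathlib
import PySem

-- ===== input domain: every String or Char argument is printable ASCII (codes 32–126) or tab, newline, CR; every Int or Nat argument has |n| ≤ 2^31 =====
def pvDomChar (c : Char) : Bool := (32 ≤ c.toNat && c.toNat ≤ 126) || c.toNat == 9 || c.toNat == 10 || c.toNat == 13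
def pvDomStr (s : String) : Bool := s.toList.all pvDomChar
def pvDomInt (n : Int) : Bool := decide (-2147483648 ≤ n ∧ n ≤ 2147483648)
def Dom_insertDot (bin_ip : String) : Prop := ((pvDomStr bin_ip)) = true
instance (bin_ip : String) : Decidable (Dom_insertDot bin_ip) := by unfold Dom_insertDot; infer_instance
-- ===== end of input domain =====

-- B slices the input into 8-char groups and joins them with '.', instead of A's per-character
-- loop with a modulo counter and a removesuffix('.') fixup (simpler decomposition; on strings
-- whose last char is '.' and length not a multiple of 8, A strips that char, B keeps it — see D_).


-- ===== PORT A =====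
-- for i in range(len(bin_ip)): ip += bin_ip[i]; if (i+1) % 8 == 0: ip += '.'   then ip.removesuffix('.')
-- (removesuffix('.') has no PySem primitive: ported by hand, exact — drop one trailing '.' if present)
def insertDot (bin_ip : String) : String :=
  let l := bin_ip.toList
  let ip := (PySem.List.pyRange 0 (l.length : Int) 1).foldl
    (fun ip i =>
      let ip := ip ++ [PySem.List.pyGetD l i ' ']
      if PySem.Int.mod (i + 1) 8 == 0 then ip ++ ['.'] else ip) ([] : List Char)
  String.ofList (if ip.getLast? == some '.' then ip.dropLast else ip)

-- ===== PORT B =====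
-- parts = [bin_ip[i:i+8] for i in range(0, len(bin_ip), 8)]; return '.'.join(parts)
def insertDot_alt (bin_ip : String) : String :=
  let l := bin_ip.toList
  let parts := (PySem.List.pyRange 0 (l.length : Int) 8).map
    (fun i => PySem.List.slice l (some i) (some (i + 8)))
  String.ofList (PySem.Chars.join ['.'] parts)

-- ===== PRECONDITION & SPEC =====
-- On nonempty inputs whose length is not a multiple of 8 and whose last character is '.',
-- A's removesuffix('.') strips that genuine final input character, while B keeps every
-- input character, which is the intended behaviour of a function that only inserts separators.
def D_insertDot (bin_ip : String) : Prop :=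
  bin_ip.toList ≠ [] ∧ bin_ip.toList.length % 8 ≠ 0 ∧ bin_ip.toList.getLast? = some '.'
instance (bin_ip : String) : Decidable (D_insertDot bin_ip) := by unfold D_insertDot; infer_instance

def Spec_insertDot (bin_ip : String) (out : String) : Prop :=
  ¬ D_insertDot bin_ip → out = insertDot_alt bin_ip
instance (bin_ip : String) (out : String) : Decidable (Spec_insertDot bin_ip out) := by
  unfold Spec_insertDot; infer_instance

def pvDiffWitness_insertDot : String := "."
def pvDiffWitnessOut_insertDot : String × String := ("", ".")

-- ===== CLAIM (what is proved, stated in full; the proofs are below) =====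
def Claim_unchanged_insertDot : Prop :=
  ∀ (bin_ip : String), Dom_insertDot bin_ip → Spec_insertDot bin_ip (insertDot bin_ip)
def Claim_changed_insertDot : Prop :=
  Dom_insertDot (pvDiffWitness_insertDot) ∧ D_insertDot (pvDiffWitness_insertDot) ∧
  insertDot (pvDiffWitness_insertDot) = pvDiffWitnessOut_insertDot.1 ∧
  insertDot_alt (pvDiffWitness_insertDot) = pvDiffWitnessOut_insertDot.2 ∧
  pvDiffWitnessOut_insertDot.1 ≠ pvDiffWitnessOut_insertDot.2
def Claim_exact_insertDot : Prop :=
  ∀ (bin_ip : String), Dom_insertDot bin_ip → D_insertDot bin_ip →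
    insertDot bin_ip ≠ insertDot_alt bin_ip

-- ===== LEMMAS AND PROOFS =====

-- A's loop body as structural recursion over the remaining characters (i = absolute index).
def recA : List Char → Int → List Char → List Char
  | [], _, acc => acc
  | c :: cs, i, acc =>
      recA cs (i + 1) (if PySem.Int.mod (i + 1) 8 == 0 then acc ++ [c, '.'] else acc ++ [c])

-- the 8-character groups of a list
def chunks (l : List Char) : List (List Char) :=
  if h : l = [] then [] else l.take 8 :: chunks (l.drop 8)
  termination_by l.length
  decreasing_by
    simp only [List.length_drop]
    have := List.length_pos_of_ne_nil h
    omega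

lemma chunks_nil : chunks [] = [] := by rw [chunks]; simp

lemma chunks_of_ne_nil {l : List Char} (h : l ≠ []) :
    chunks l = l.take 8 :: chunks (l.drop 8) := by
  rw [chunks]; simp [h]

-- A's fold over pyRange is recA over the remaining suffix
lemma foldA (rest front : List Char) (acc : List Char) :
    (PySem.List.pyRange (front.length : Int) ((front ++ rest).length : Int) 1).foldl
      (fun ip i =>
        let ip := ip ++ [PySem.List.pyGetD (front ++ rest) i ' ']
        if PySem.Int.mod (i + 1) 8 == 0 then ip ++ ['.'] else ip) acc
    = recA rest (front.length : Int) acc := by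
  induction rest generalizing front acc with
  | nil => simp [recA, PySem.List.pyRange_one_eq_nil]
  | cons c cs ih =>
    have hlt : (front.length : Int) < ((front ++ c :: cs).length : Int) := by
      simp only [List.length_append, List.length_cons]; push_cast; omega
    rw [PySem.List.pyRange_one_cons hlt, List.foldl_cons]
    have hget : PySem.List.pyGetD (front ++ c :: cs) (front.length : Int) ' ' = c := by
      rw [PySem.List.pyGetD_natCast]
      simp [List.getD_eq_getElem?_getD]
    have key := ih (front ++ [c])
      (if PySem.Int.mod ((front.length : Int) + 1) 8 == 0
        then (acc ++ [PySem.List.pyGetD (front ++ c :: cs) (front.length : Int) ' ']) ++ ['.']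
        else acc ++ [PySem.List.pyGetD (front ++ c :: cs) (front.length : Int) ' '])
    rw [hget] at key
    simp only [List.append_assoc, List.singleton_append, List.length_append,
      List.length_cons, List.length_nil, Nat.cast_add, Nat.cast_one] at key ⊢
    rw [recA, hget]
    rw [show ((front.length : Int) + (↑cs.length + 1)) = (↑front.length + 1 + ↑cs.length) by ring] at key ⊢
    exact key

-- within one chunk no dot is appended
lemma recA_short (l : List Char) (q : Int) (j : Nat) (hj : j + l.length < 8) (acc : List Char) :
    recA l (8 * q + (j : Int)) acc = acc ++ l := by
  induction l generalizing j acc with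
  | nil => simp [recA]
  | cons c cs ih =>
    rw [recA]
    have hm : PySem.Int.mod (8 * q + (j : Int) + 1) 8 = ((j : Int) + 1) := by
      rw [PySem.Int.mod_eq_emod_of_pos (by omega)]
      simp only [List.length_cons] at hj; omega
    have hne : ¬ (PySem.Int.mod (8 * q + (j : Int) + 1) 8 == 0) = true := by
      rw [hm]; simp only [List.length_cons] at hj
      simp; omega
    simp only [hne, Bool.false_eq_true, if_false]
    have step := ih (j + 1) (by simp only [List.length_cons] at hj; omega) (acc ++ [c])
    rw [show 8 * q + (j : Int) + 1 = 8 * q + ((j + 1 : Nat) : Int) by push_cast; ring]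
    rw [step]; simp

-- a full chunk: 8 characters then a dot
lemma recA_chunk (l : List Char) (rest : List Char) (q : Int) (j : Nat)
    (hj : j < 8) (hl : l.length + j = 8) (acc : List Char) :
    recA (l ++ rest) (8 * q + (j : Int)) acc = recA rest (8 * (q + 1)) (acc ++ l ++ ['.']) := by
  induction l generalizing j acc with
  | nil => simp only [List.length_nil] at hl; omega
  | cons c cs ih =>
    rw [List.cons_append, recA]
    by_cases h8 : j + 1 = 8
    · have hcs : cs = [] := by
        simp only [List.length_cons] at hl
        exact List.eq_nil_of_length_eq_zero (by omega)
      have hm : PySem.Int.mod (8 * q + (j : Int) + 1) 8 = 0 := by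
        rw [PySem.Int.mod_eq_emod_of_pos (by omega)]; omega
      subst hcs
      simp only [hm, List.nil_append]
      rw [show 8 * q + (j : Int) + 1 = 8 * (q + 1) by omega]
      simp [recA]
    · have hm : PySem.Int.mod (8 * q + (j : Int) + 1) 8 = ((j : Int) + 1) := by
        rw [PySem.Int.mod_eq_emod_of_pos (by omega)]; omega
      have hne : ¬ (PySem.Int.mod (8 * q + (j : Int) + 1) 8 == 0) = true := by
        rw [hm]; simp; omega
      simp only [hne, Bool.false_eq_true, if_false]
      have step := ih (j + 1) (by omega)
        (by simp only [List.length_cons] at hl; omega) (acc ++ [c])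
      rw [show 8 * q + (j : Int) + 1 = 8 * q + ((j + 1 : Nat) : Int) by push_cast; ring]
      rw [step]; simp

-- join over a cons with a nonempty tail
lemma join_cons_ne_nil (sep p : List Char) (rest : List (List Char)) (h : rest ≠ []) :
    PySem.Chars.join sep (p :: rest) = p ++ sep ++ PySem.Chars.join sep rest := by
  obtain ⟨q, rs, rfl⟩ := List.exists_cons_of_ne_nil h
  exact PySem.Chars.join_cons_cons sep p q rs

-- characterization of A's loop from a chunk boundary
lemma recA_boundary (n : Nat) (l : List Char) (hn : l.length ≤ n) (q : Int) (acc : List Char) :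
    recA l (8 * q) acc
    = acc ++ PySem.Chars.join ['.'] (chunks l)
        ++ (if l.length % 8 = 0 ∧ l ≠ [] then ['.'] else []) := by
  induction n generalizing l q acc with
  | zero =>
    have : l = [] := List.eq_nil_of_length_eq_zero (by omega)
    subst this; simp [recA, chunks_nil, PySem.Chars.join_nil]
  | succ n ih =>
    by_cases hnil : l = []
    · subst hnil; simp [recA, chunks_nil, PySem.Chars.join_nil]
    · by_cases hlen : l.length < 8
      · have short := recA_short l q 0 (by omega) acc
        simp only [Nat.cast_zero, add_zero] at short
        rw [short, chunks_of_ne_nil hnil]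
        rw [List.drop_eq_nil_of_le (by omega), chunks_nil,
          List.take_of_length_le (by omega), PySem.Chars.join_singleton]
        have hmod : ¬ (l.length % 8 = 0 ∧ l ≠ []) := by
          rintro ⟨h0, -⟩
          exact hnil (List.eq_nil_of_length_eq_zero (by omega))
        simp [hmod]
      · push_neg at hlen
        have hchunk := recA_chunk (l.take 8) (l.drop 8) q 0 (by omega)
          (by simp only [List.length_take]; omega) acc
        simp only [Nat.cast_zero, add_zero, List.take_append_drop] at hchunk
        rw [hchunk, ih (l.drop 8) (by simp only [List.length_drop]; omega) (q + 1)
          (acc ++ l.take 8 ++ ['.'])]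
        rw [chunks_of_ne_nil hnil]
        by_cases hd : l.drop 8 = []
        · have hlen8 : l.length = 8 := by
            have hld := List.length_drop (l := l) (i := 8)
            rw [hd] at hld; simp only [List.length_nil] at hld; omega
          rw [hd, chunks_nil, PySem.Chars.join_singleton,
            List.take_of_length_le (by omega)]
          simp [chunks_nil, PySem.Chars.join_nil, hlen8, hnil]
        · rw [join_cons_ne_nil _ _ _ (by rw [chunks_of_ne_nil hd]; exact List.cons_ne_nil _ _)]
          have hmod : (l.drop 8).length % 8 = l.length % 8 := by
            simp only [List.length_drop]; omega
          simp only [List.length_drop] at *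
          have h9 : (l.length - 8) % 8 = l.length % 8 := by omega
          simp [h9, hd, hnil]

-- B's strided slice comprehension computes exactly `chunks`
lemma slice_shift (l : List Char) (a : Int) (ha : 0 ≤ a) :
    PySem.List.slice l (some (a + 8)) (some (a + 8 + 8))
    = PySem.List.slice (l.drop 8) (some a) (some (a + 8)) := by
  have h1 := PySem.List.slice_toNat l (a := a + 8) (b := a + 8 + 8) (by omega) (by omega)
  have h2 := PySem.List.slice_toNat (l.drop 8) (a := a) (b := a + 8) (by omega) (by omega)
  rw [h1, h2, List.drop_drop]
  congr 1
  · omega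
  · congr 1
    omega

lemma alt_chunks (n : Nat) (l : List Char) (hn : l.length ≤ n) :
    (PySem.List.pyRange 0 (l.length : Int) 8).map
      (fun i => PySem.List.slice l (some i) (some (i + 8))) = chunks l := by
  induction n generalizing l with
  | zero =>
    have : l = [] := List.eq_nil_of_length_eq_zero (by omega)
    subst this
    simp [chunks_nil, PySem.List.pyRange_of_pos 0 0 (by omega : (0:Int) < 8)]
  | succ n ih =>
    by_cases hnil : l = []
    · subst hnil
      simp [chunks_nil, PySem.List.pyRange_of_pos 0 0 (by omega : (0:Int) < 8)]
    · have hpos : 0 < l.length := List.length_pos_of_ne_nil hnil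
      rw [PySem.List.pyRange_of_pos _ _ (by omega : (0:Int) < 8)]
      have hlt : (0 : Int) < (l.length : Int) := by exact_mod_cast hpos
      simp only [hlt, if_true]
      have hm : (((l.length : Int) - 0 + 8 - 1) / 8).toNat
          = ((((l.drop 8).length : Int) - 0 + 8 - 1) / 8).toNat + 1 := by
        simp only [List.length_drop]
        omega
      rw [hm, List.range_succ_eq_map]
      simp only [List.map_cons, List.map_map]
      rw [chunks_of_ne_nil hnil]
      congr 1
      · show PySem.List.slice l (some (0 + 8 * ((0 : Nat) : Int)))
            (some (0 + 8 * ((0 : Nat) : Int) + 8)) = l.take 8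
        have h1 := PySem.List.slice_toNat l (a := 0 + 8 * ((0 : Nat) : Int))
          (b := 0 + 8 * ((0 : Nat) : Int) + 8) (by simp) (by simp)
        rw [h1]
        simp
      · by_cases hlen : l.length ≤ 8
        · -- only one chunk: both remainders are empty
          have hd : l.drop 8 = [] := List.drop_eq_nil_of_le (by omega)
          have h0 : ((((l.drop 8).length : Int) - 0 + 8 - 1) / 8).toNat = 0 := by
            simp [hd]
          rw [h0, List.range_zero, List.map_nil, hd, chunks_nil]
        · push_neg at hlen
          rw [← ih (l.drop 8) (by simp only [List.length_drop]; omega)]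
          rw [PySem.List.pyRange_of_pos _ _ (by omega : (0:Int) < 8)]
          have hd : l.drop 8 ≠ [] := by
            intro h
            have hld := List.length_drop (l := l) (i := 8)
            rw [h] at hld; simp only [List.length_nil] at hld; omega
          have hdpos : (0:Int) < ((l.drop 8).length : Int) := by
            have := List.length_pos_of_ne_nil hd; exact_mod_cast this
          simp only [hdpos, if_true, List.map_map]
          apply List.map_congr_left
          intro k hk
          show PySem.List.slice l (some (0 + 8 * ((k + 1 : Nat) : Int)))
              (some (0 + 8 * ((k + 1 : Nat) : Int) + 8))
            = PySem.List.slice (l.drop 8) (some (0 + 8 * ((k : Nat) : Int)))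
              (some (0 + 8 * ((k : Nat) : Int) + 8))
          have e : (0 : Int) + 8 * ((k + 1 : Nat) : Int)
              = (0 + 8 * ((k : Nat) : Int)) + 8 := by push_cast; ring
          rw [e]
          exact slice_shift l _ (by omega)

-- join of chunks is nonempty when l is
lemma join_chunks_ne_nil (l : List Char) (hnil : l ≠ []) :
    PySem.Chars.join ['.'] (chunks l) ≠ [] := by
  rw [chunks_of_ne_nil hnil]
  by_cases hd : chunks (l.drop 8) = []
  · rw [hd, PySem.Chars.join_singleton]
    simp [List.take_eq_nil_iff, hnil]
  · rw [join_cons_ne_nil _ _ _ hd]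
    simp

lemma join_chunks_getLast (n : Nat) (l : List Char) (hn : l.length ≤ n) (hnil : l ≠ [])
    (hmod : l.length % 8 ≠ 0) :
    (PySem.Chars.join ['.'] (chunks l)).getLast? = l.getLast? := by
  induction n generalizing l with
  | zero =>
    exact absurd (List.eq_nil_of_length_eq_zero (by omega)) hnil
  | succ n ih =>
    by_cases hlen : l.length < 8
    · rw [chunks_of_ne_nil hnil, List.drop_eq_nil_of_le (by omega), chunks_nil,
        PySem.Chars.join_singleton, List.take_of_length_le (by omega)]
    · push_neg at hlen
      have hd : l.drop 8 ≠ [] := by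
        intro h
        have hld := List.length_drop (l := l) (i := 8)
        rw [h] at hld; simp only [List.length_nil] at hld; omega
      have hgt : 8 < l.length := by
        have hld := List.length_drop (l := l) (i := 8)
        have := List.length_pos_of_ne_nil hd; omega
      rw [chunks_of_ne_nil hnil,
        join_cons_ne_nil _ _ _ (by rw [chunks_of_ne_nil hd]; exact List.cons_ne_nil _ _)]
      have hrec := ih (l.drop 8) (by simp only [List.length_drop]; omega) hd
        (by simp only [List.length_drop]; omega)
      cases hx : (l.drop 8).getLast? with
      | none => exact absurd (List.getLast?_eq_none_iff.mp hx) hd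
      | some x =>
        rw [List.getLast?_append, hrec, hx, Option.some_or]
        rw [List.getLast?_drop, if_neg (by omega)] at hx
        exact hx.symm

-- the equality of the char-level results, outside D
lemma core_eq (l : List Char) (hD : ¬ (l ≠ [] ∧ l.length % 8 ≠ 0 ∧ l.getLast? = some '.')) :
    (if (recA l 0 []).getLast? == some '.' then (recA l 0 []).dropLast else recA l 0 [])
    = PySem.Chars.join ['.'] (chunks l) := by
  have hb := recA_boundary l.length l (le_refl _) 0 []
  simp only [mul_zero] at hb
  by_cases hnil : l = []
  · subst hnil
    simp [recA, chunks_nil, PySem.Chars.join_nil]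
  · by_cases hmod : l.length % 8 = 0
    · -- trailing dot present, stripped by removesuffix
      have hcond : l.length % 8 = 0 ∧ l ≠ [] := ⟨hmod, hnil⟩
      rw [hb, if_pos hcond]
      simp only [List.nil_append]
      have hlastd : ((PySem.Chars.join ['.'] (chunks l)) ++ ['.']).getLast? = some '.' := by
        rw [List.getLast?_append]; rfl
      rw [hlastd]
      simp
    · have hcond : ¬ (l.length % 8 = 0 ∧ l ≠ []) := fun h => hmod h.1
      rw [hb, if_neg hcond]
      simp only [List.nil_append, List.append_nil]
      have hlast := join_chunks_getLast l.length l (le_refl _) hnil hmod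
      have hne : ¬ (l.getLast? = some '.') := fun h => hD ⟨hnil, hmod, h⟩
      simp [hlast, hne]

-- ===== VERDICT (by name: the statement is the Claim_ definition above) =====
theorem insertDot_spec : Claim_unchanged_insertDot := by
  intro s _ hD
  unfold insertDot insertDot_alt
  have hfold := foldA s.toList [] ([] : List Char)
  simp only [List.nil_append, List.length_nil, Nat.cast_zero] at hfold
  simp only []
  rw [hfold]
  rw [alt_chunks s.toList.length s.toList (le_refl _)]
  rw [core_eq s.toList (by unfold D_insertDot at hD; exact hD)]

theorem insertDot_changed : Claim_changed_insertDot := by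
  unfold Claim_changed_insertDot; decide

theorem insertDot_tight : Claim_exact_insertDot := by
  intro s _ hD heq
  unfold D_insertDot at hD
  obtain ⟨hnil, hmod, hlast⟩ := hD
  unfold insertDot insertDot_alt at heq
  have hfold := foldA s.toList [] ([] : List Char)
  simp only [List.nil_append, List.length_nil, Nat.cast_zero] at hfold
  simp only [] at heq
  rw [hfold] at heq
  rw [alt_chunks s.toList.length s.toList (le_refl _)] at heq
  have hb := recA_boundary s.toList.length s.toList (le_refl _) 0 []
  simp only [mul_zero] at hb
  have hcond : ¬ (s.toList.length % 8 = 0 ∧ s.toList ≠ []) := fun h => hmod h.1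
  rw [hb, if_neg hcond, List.nil_append, List.append_nil] at heq
  have hJlast : (PySem.Chars.join ['.'] (chunks s.toList)).getLast? = some '.' := by
    rw [join_chunks_getLast s.toList.length s.toList (le_refl _) hnil hmod, hlast]
  rw [hJlast] at heq
  simp only [beq_self_eq_true, if_true] at heq
  have hlen := congrArg (fun t => t.toList.length) heq
  simp only [String.toList_ofList, List.length_dropLast] at hlen
  have hJpos : 0 < (PySem.Chars.join ['.'] (chunks s.toList)).length :=
    List.length_pos_of_ne_nil (join_chunks_ne_nil s.toList hnil)
  omega
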